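-- pv_equiv track=rewrite | github.com/HUN0914/KB7-Algorithm-Study | Choonghun/programmers/12938번 - 최고의 집합/최고의 집합.py | solution
-- ===== SOURCE A (Python) =====
-- def solution(n, s):
--     if not s // n: # 몫이 0이면 집합이 존재하지 않으므로 [-1] 반환
--         return [-1]
--     else:   # s를 n으로 나눈 몫을 길이 n의 배열로 만들고
--         answer = [s//n for _ in range(n)]
--         for i in range(len(answer)-1, len(answer)-1-s%n, -1): #오름차순이므로 1을 s를 n으로 나눈 나머지만큼 뒤에서부터 더해준다.
--             answer[i] += 1
--         return answer
-- ===== SOURCE B (Python) =====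
-- def solution(n, s):
--     if s // n == 0:
--         return [-1]
--     out = []
--     rem = s
--     for k in range(n, 0, -1):
--         v = -(-rem // k)  # ceiling of rem/k: the largest element of the best set of size k summing to rem
--         out.append(v)
--         rem -= v
--     return out[::-1]
-- ===== Notes on version B (the rewrite author's own statement) =====
-- stated objective: alternative
-- what changed: B replaces A's initialize-then-suffix-increment construction with a greedy one-pass algorithm: for k = n down to 1 it emits the ceiling of the remaining sum over the remaining count and subtracts it, then reverses the collected list.
import Mathlib
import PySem

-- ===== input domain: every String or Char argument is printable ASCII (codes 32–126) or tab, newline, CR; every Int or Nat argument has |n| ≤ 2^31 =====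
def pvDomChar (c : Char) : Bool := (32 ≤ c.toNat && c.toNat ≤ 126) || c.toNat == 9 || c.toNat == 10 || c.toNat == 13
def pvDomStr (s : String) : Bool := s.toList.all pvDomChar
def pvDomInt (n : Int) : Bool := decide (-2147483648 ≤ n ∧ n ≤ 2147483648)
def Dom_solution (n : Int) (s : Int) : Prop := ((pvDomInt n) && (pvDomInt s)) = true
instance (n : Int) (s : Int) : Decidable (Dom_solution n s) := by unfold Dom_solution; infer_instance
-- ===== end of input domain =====

-- B builds each element greedily as the ceiling of the remaining sum over the
-- remaining count, instead of initializing a constant list and incrementing a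
-- suffix in a second loop (objective: alternative).

-- ===== PORT A =====
def solution (n : Int) (s : Int) : List Int :=
  if PySem.Int.floordiv s n = 0 then [-1]
  else
    let answer := (PySem.List.pyRange 0 n 1).map (fun _ => PySem.Int.floordiv s n)
    (PySem.List.pyRange (PySem.List.len answer - 1)
        (PySem.List.len answer - 1 - PySem.Int.mod s n) (-1)).foldl
      (fun acc i => PySem.List.pySetD acc i (PySem.List.pyGetD acc i 0 + 1)) answer

-- ===== PORT B =====
def solution_alt (n : Int) (s : Int) : List Int :=
  if PySem.Int.floordiv s n = 0 then [-1]
  else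
    (((PySem.List.pyRange n 0 (-1)).foldl
        (fun (st : List Int × Int) k =>
          let v := -(PySem.Int.floordiv (-st.2) k)
          (st.1 ++ [v], st.2 - v)) ([], s)).1).reverse

-- ===== PRECONDITION & SPEC =====
-- Pre_ excludes n = 0, where both Pythons raise ZeroDivisionError.
def Pre_solution (n : Int) (s : Int) : Prop := n ≠ 0
instance (n : Int) (s : Int) : Decidable (Pre_solution n s) := by unfold Pre_solution; infer_instance
def pvWitness_solution : Int × Int := (3, 11)

def Spec_solution (n : Int) (s : Int) (out : List Int) : Prop := out = solution_alt n s
instance (n : Int) (s : Int) (out : List Int) : Decidable (Spec_solution n s out) := by unfold Spec_solution; infer_instance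

-- ===== CLAIM (what is proved, stated in full; the proofs are below) =====
def Claim_equal_solution : Prop := ∀ (n : Int) (s : Int), Dom_solution n s → Pre_solution n s → Spec_solution n s (solution n s)

-- ===== LEMMAS AND PROOFS =====

-- setting the last slot of a replicate block
theorem set_replicate_last (q v : Int) (k : Nat) :
    (List.replicate (k + 1) q).set k v = List.replicate k q ++ [v] := by
  induction k with
  | zero => rfl
  | succ k ih =>
    rw [List.replicate_succ, List.set_cons_succ, ih]
    simp [List.replicate_succ]

theorem blocks_get (q : Int) (a b : Nat) :
    PySem.List.pyGetD (List.replicate (a+1) q ++ List.replicate b (q+1)) ((a : Nat) : Int) 0 = q := by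
  rw [PySem.List.pyGetD_natCast, List.getD_eq_getElem?_getD,
    List.getElem?_append_left (by simp)]
  simp

theorem blocks_step (q : Int) (a b : Nat) :
    (List.replicate (a+1) q ++ List.replicate b (q+1)).set a (q+1)
      = List.replicate a q ++ List.replicate (b+1) (q+1) := by
  rw [List.set_append_left _ _ (by simp), set_replicate_last]
  simp [List.replicate_succ]

-- A's suffix-increment loop on a constant list yields two constant blocks
theorem loop_eq (q : Int) (m r : Nat) (h : r ≤ m) :
    (PySem.List.pyRange ((m : Int) - 1) ((m : Int) - 1 - (r : Int)) (-1)).foldl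
      (fun acc i => PySem.List.pySetD acc i (PySem.List.pyGetD acc i 0 + 1))
      (List.replicate m q)
    = List.replicate (m - r) q ++ List.replicate r (q + 1) := by
  induction r with
  | zero =>
    rw [PySem.List.pyRange_neg_one_eq_nil (by omega)]
    simp
  | succ r ih =>
    have hr : r ≤ m := Nat.le_of_succ_le h
    have ihr := ih hr
    rw [PySem.List.pyRange_neg_one_eq_reverse] at ihr ⊢
    have a1 : (m : Int) - 1 - (r : Int) + 1 = (m : Int) - (r : Int) := by ring
    have a2 : (m : Int) - 1 + 1 = (m : Int) := by ring
    have e1 : PySem.List.pyRange ((m : Int) - 1 - ((r : Nat) : Int) + 1) ((m : Int) - 1 + 1) 1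
        = PySem.List.pyRange ((m : Int) - (r : Int)) ((m : Int)) 1 := by rw [a1, a2]
    have e2 : PySem.List.pyRange ((m : Int) - 1 - (((r : Nat) + 1 : Nat) : Int) + 1) ((m : Int) - 1 + 1) 1
        = ((m : Int) - (r : Int) - 1) :: PySem.List.pyRange ((m : Int) - (r : Int)) ((m : Int)) 1 := by
      have h1 : ((m : Int) - 1 - (((r : Nat) + 1 : Nat) : Int) + 1) = (m : Int) - (r : Int) - 1 := by push_cast; ring
      rw [h1, a2, PySem.List.pyRange_one_cons (by omega),
        (by ring : (m : Int) - (r : Int) - 1 + 1 = (m : Int) - (r : Int))]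
    rw [e1] at ihr
    rw [e2]
    simp only [List.reverse_cons, List.foldl_append, List.foldl_cons, List.foldl_nil, ihr]
    obtain ⟨a, ha1, ha2⟩ : ∃ a, m - r = a + 1 ∧ m - (r + 1) = a := ⟨m - r - 1, by omega, by omega⟩
    have hcast : (m : Int) - (r : Int) - 1 = ((a : Nat) : Int) := by omega
    rw [ha1, ha2, hcast, blocks_get, PySem.List.pySetD_natCast, blocks_step]

-- B's greedy ceiling loop: starting from k*q + r with 0 ≤ r ≤ k it emits
-- r copies of q+1 followed by k-r copies of q (in that order, before the reverse)
theorem greedy_eq (q : Int) : ∀ (k r : Nat), r ≤ k → ∀ (acc : List Int),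
    (PySem.List.pyRange (k : Int) 0 (-1)).foldl
      (fun (st : List Int × Int) i =>
        let v := -(PySem.Int.floordiv (-st.2) i)
        (st.1 ++ [v], st.2 - v))
      (acc, (k : Int) * q + (r : Int))
    = (acc ++ List.replicate r (q+1) ++ List.replicate (k - r) q, 0) := by
  intro k
  induction k with
  | zero =>
    intro r hr acc
    interval_cases r
    rw [PySem.List.pyRange_neg_one_eq_nil (by omega)]
    simp
  | succ k ih =>
    intro r hr acc
    rw [(by push_cast; ring : ((k + 1 : Nat) : Int) = (k : Int) + 1),
      PySem.List.pyRange_neg_one_cons (by omega), List.foldl_cons,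
      (by push_cast; ring : (k : Int) + 1 - 1 = (k : Int))]
    cases r with
    | zero =>
      have hv : -(PySem.Int.floordiv (-(((k : Int) + 1) * q + ((0 : Nat) : Int))) ((k : Int) + 1)) = q := by
        rw [PySem.Int.neg_floordiv_neg_eq_iff_of_pos (show (0:Int) < (k : Int) + 1 by omega)]
        push_cast
        constructor <;> nlinarith
      simp only [hv]
      have hrem : ((k : Int) + 1) * q + ((0 : Nat) : Int) - q = (k : Int) * q + ((0 : Nat) : Int) := by
        push_cast; ring
      rw [hrem, ih 0 (by omega) (acc ++ [q])]
      simp [List.replicate_succ]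
    | succ r =>
      have hv : -(PySem.Int.floordiv (-(((k : Int) + 1) * q + ((r + 1 : Nat) : Int))) ((k : Int) + 1)) = q + 1 := by
        rw [PySem.Int.neg_floordiv_neg_eq_iff_of_pos (show (0:Int) < (k : Int) + 1 by omega)]
        push_cast
        constructor <;> nlinarith [Nat.cast_le (α := Int) |>.2 hr]
      simp only [hv]
      have hrem : ((k : Int) + 1) * q + ((r + 1 : Nat) : Int) - (q + 1) = (k : Int) * q + ((r : Nat) : Int) := by
        push_cast; ring
      rw [hrem, ih r (by omega) (acc ++ [q + 1])]
      have : k + 1 - (r + 1) = k - r := by omega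
      simp [this, List.replicate_succ, List.append_assoc]

-- ===== VERDICT (by name: the statement is the Claim_ definition above) =====
theorem solution_spec : Claim_equal_solution := by
  intro n s _ hn
  have hn' : n ≠ 0 := hn
  unfold Spec_solution solution solution_alt
  by_cases hq : PySem.Int.floordiv s n = 0
  · simp [hq]
  · simp only [if_neg hq]
    rcases lt_trichotomy n 0 with hneg | h0 | hpos
    · -- n < 0 : both sides are []
      have hm := PySem.Int.mod_neg_bounds (a := s) (b := n) hneg
      rw [PySem.List.pyRange_one_eq_nil (by omega)]
      simp only [List.map_nil]
      rw [PySem.List.pyRange_neg_one_eq_nil (by simp [PySem.List.len]; omega)]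
      rw [PySem.List.pyRange_neg_one_eq_nil (by omega)]
      simp
    · exact absurd h0 hn'
    · -- n > 0
      set q := PySem.Int.floordiv s n with hqdef
      set r := PySem.Int.mod s n with hrdef
      have hr0 : 0 ≤ r := PySem.Int.mod_nonneg _ hpos
      have hrlt : r < n := PySem.Int.mod_lt _ hpos
      have hsum : q * n + r = s := PySem.Int.floordiv_mul_add_mod s n
      -- A side
      have hmap : (PySem.List.pyRange 0 n 1).map (fun _ => q)
          = List.replicate n.toNat q := by
        rw [List.eq_replicate_iff]
        constructor
        · simp [PySem.List.length_pyRange_one]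
        · intro b hb
          simp only [List.mem_map] at hb
          obtain ⟨x, _, hx⟩ := hb
          exact hx.symm
      rw [hmap]
      have hlen : PySem.List.len (List.replicate n.toNat q) = ((n.toNat : Nat) : Int) := by
        simp [PySem.List.len]
      rw [hlen]
      have hrcast : r = ((r.toNat : Nat) : Int) := by omega
      rw [hrcast, loop_eq _ _ _ (by omega)]
      -- B side
      have hs : s = ((n.toNat : Nat) : Int) * q + ((r.toNat : Nat) : Int) := by
        rw [Int.toNat_of_nonneg (le_of_lt hpos), Int.toNat_of_nonneg hr0]
        linear_combination -hsum
      rw [(by omega : n = ((n.toNat : Nat) : Int)), hs,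
        greedy_eq q n.toNat r.toNat (by omega) []]
      simp only [List.nil_append, List.reverse_append, List.reverse_replicate]
      have hnn : ((n.toNat : Nat) : Int).toNat = n.toNat := by omega
      rw [hnn]
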